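-- pv_equiv track=rewrite | github.com/guimaraes13/NeuralLog | neurallog/language/parser/neural_log_listener.py | solve_parts
-- ===== SOURCE A (Python) =====
-- def solve_parts(parts, key, substitution):
--     """
--     Solve the place holders from the parts.
--
--     :param parts: the parts
--     :type parts: list[str]
--     :param key: the name of the place holder
--     :type key: str
--     :param substitution: the value of the place holder
--     :type substitution: str
--     :return: the solved parts
--     :rtype: list[str]
--     """
--     solved_terms = []
--     join_terms = ""
--     for part in parts:
--         if part.startswith("{"):
--             if key == part[1:-1]:
--                 join_terms += substitution
--             else:
--                 if join_terms != "":
--                     solved_terms.append(str(join_terms))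
--                     join_terms = ""
--                 solved_terms.append(part)
--         else:
--             join_terms += part
--     if join_terms != "":
--         solved_terms.append(str(join_terms))
--
--     return solved_terms
-- ===== SOURCE B (Python) =====
-- def solve_parts(parts, key, substitution):
--     # Classify each part into a token, then group consecutive joinable tokens.
--     def classify(part):
--         if part.startswith("{"):
--             if part[1:-1] == key:
--                 return (False, substitution)   # joinable: resolved placeholder
--             return (True, part)                # standalone: unresolved placeholder
--         return (False, part)                   # joinable: plain text
--
--     tokens = [classify(p) for p in parts]
--     result = []
--     i = 0
--     n = len(tokens)
--     while i < n:
--         if tokens[i][0]: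
--             result.append(tokens[i][1])
--             i += 1
--         else:
--             frags = []
--             while i < n and not tokens[i][0]:
--                 frags.append(tokens[i][1])
--                 i += 1
--             joined = "".join(frags)
--             if joined:
--                 result.append(joined)
--     return result
-- ===== Notes on version B (the rewrite author's own statement) =====
-- stated objective: alternative
-- what changed: Replaces A's inline accumulator-and-flush loop with a classify-then-group decomposition: each part is first mapped to a tagged token (standalone placeholder vs joinable fragment), then consecutive joinable runs are joined and emitted, dropping empty joins.
import Mathlib
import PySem

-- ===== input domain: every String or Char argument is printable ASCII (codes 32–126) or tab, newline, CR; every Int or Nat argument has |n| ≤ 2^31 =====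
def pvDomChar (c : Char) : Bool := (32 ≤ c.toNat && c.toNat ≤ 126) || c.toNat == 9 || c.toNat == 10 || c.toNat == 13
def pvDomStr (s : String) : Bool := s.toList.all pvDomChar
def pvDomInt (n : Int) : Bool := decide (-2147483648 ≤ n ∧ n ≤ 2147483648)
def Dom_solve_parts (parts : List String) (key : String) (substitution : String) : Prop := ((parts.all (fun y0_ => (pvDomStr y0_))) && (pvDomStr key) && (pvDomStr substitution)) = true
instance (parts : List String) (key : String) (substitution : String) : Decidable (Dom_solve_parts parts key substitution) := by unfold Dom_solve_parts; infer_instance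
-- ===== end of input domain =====

-- B replaces A's inline accumulator-and-flush loop by a classify-then-group decomposition (alternative, same cost).

-- ===== PORT A =====
-- A's for-loop over the state (solved_terms, join_terms), transliterated as structural recursion on parts.
def solveALoop (key substitution : String) : List String → List String → String → List String × String
  | [], solved, join => (solved, join)
  | p :: ps, solved, join =>
    if PySem.Str.startswith p "{" then
      if key == PySem.Str.slice p (some 1) (some (-1)) then
        solveALoop key substitution ps solved (join ++ substitution)
      else
        solveALoop key substitution ps ((if join ≠ "" then solved ++ [join] else solved) ++ [p]) ""
    else
      solveALoop key substitution ps solved (join ++ p)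

def solve_parts (parts : List String) (key : String) (substitution : String) : List String :=
  let st := solveALoop key substitution parts [] ""
  if st.2 ≠ "" then st.1 ++ [st.2] else st.1

-- ===== PORT B =====
-- classify: (true, part) = standalone unresolved placeholder; (false, v) = joinable fragment
def bClassify (key substitution : String) (part : String) : Bool × String :=
  if PySem.Str.startswith part "{" then
    if PySem.Str.slice part (some 1) (some (-1)) == key then (false, substitution)
    else (true, part)
  else (false, part)

-- Source B's inner while loop: collect a maximal run of joinable fragments, return (fragments, rest)
def bTakeRun : List (Bool × String) → List String × List (Bool × String)
  | [] => ([], [])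
  | (b, v) :: rest =>
    if b then ([], (b, v) :: rest)
    else ((v :: (bTakeRun rest).1), (bTakeRun rest).2)

theorem bTakeRun_length_le : ∀ (ts : List (Bool × String)), (bTakeRun ts).2.length ≤ ts.length := by
  intro ts
  induction ts with
  | nil => simp [bTakeRun]
  | cons h t ih =>
    obtain ⟨b, v⟩ := h
    by_cases hb : b = true <;> simp [bTakeRun, hb] <;> omega

-- Source B's outer while loop over the token list
def bEmit : List (Bool × String) → List String
  | [] => []
  | (true, v) :: rest => v :: bEmit rest
  | (false, v) :: rest =>
    (if String.join (v :: (bTakeRun rest).1) ≠ "" then [String.join (v :: (bTakeRun rest).1)] else []) ++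
      bEmit (bTakeRun rest).2
  termination_by ts => ts.length
  decreasing_by
    all_goals simp only [List.length_cons]
    · omega
    · exact Nat.lt_succ_of_le (bTakeRun_length_le rest)

def solve_parts_alt (parts : List String) (key : String) (substitution : String) : List String :=
  bEmit (parts.map (bClassify key substitution))

-- ===== PRECONDITION & SPEC =====
def Spec_solve_parts (parts : List String) (key : String) (substitution : String) (out : List String) : Prop := out = solve_parts_alt parts key substitution
instance (parts : List String) (key : String) (substitution : String) (out : List String) : Decidable (Spec_solve_parts parts key substitution out) := by unfold Spec_solve_parts; infer_instance

-- ===== CLAIM (what is proved, stated in full; the proofs are below) =====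
def Claim_equal_solve_parts : Prop := ∀ (parts : List String) (key : String) (substitution : String), Dom_solve_parts parts key substitution → Spec_solve_parts parts key substitution (solve_parts parts key substitution)

-- ===== LEMMAS AND PROOFS =====

theorem strFoldlAppend (l : List String) : ∀ a : String, l.foldl (· ++ ·) a = a ++ l.foldl (· ++ ·) "" := by
  induction l with
  | nil => intro a; simp [List.foldl]
  | cons x xs ih =>
    intro a
    simp only [List.foldl]
    rw [ih (a ++ x), ih ("" ++ x)]
    simp [String.append_assoc]

theorem sjoin_nil : String.join ([] : List String) = "" := rfl

theorem sjoin_cons (v : String) (l : List String) : String.join (v :: l) = v ++ String.join l := by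
  simp only [String.join, List.foldl]
  rw [strFoldlAppend l ("" ++ v)]
  simp

-- A's final flush, as a function of the loop state
def finishA (st : List String × String) : List String :=
  if st.2 ≠ "" then st.1 ++ [st.2] else st.1

-- intermediate form: B's grouping with a pending join prefix
def gEmit : String → List (Bool × String) → List String
  | join, [] => if join ≠ "" then [join] else []
  | join, (true, v) :: rest => (if join ≠ "" then [join] else []) ++ v :: gEmit "" rest
  | join, (false, v) :: rest => gEmit (join ++ v) rest

theorem bEmit_eq_run (ts : List (Bool × String)) :
    bEmit ts = (if String.join (bTakeRun ts).1 ≠ "" then [String.join (bTakeRun ts).1] else []) ++ bEmit (bTakeRun ts).2 := by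
  match ts with
  | [] => rw [bEmit]; simp [bTakeRun, bEmit, sjoin_nil]
  | (true, v) :: rest => simp [bTakeRun, sjoin_nil]
  | (false, v) :: rest =>
    rw [bEmit]
    simp only [bTakeRun, Bool.false_eq_true, if_false]

theorem gEmit_eq (ts : List (Bool × String)) : ∀ join,
    gEmit join ts = (if join ++ String.join (bTakeRun ts).1 ≠ "" then [join ++ String.join (bTakeRun ts).1] else []) ++ bEmit (bTakeRun ts).2 := by
  induction ts with
  | nil =>
    intro join
    simp only [gEmit]
    simp [bTakeRun, bEmit, sjoin_nil]
  | cons h t ih =>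
    obtain ⟨b, v⟩ := h
    intro join
    cases b with
    | true =>
      have ht : gEmit "" t = bEmit t := by
        rw [ih "", bEmit_eq_run t]; simp
      simp only [gEmit]
      rw [ht]
      simp [bTakeRun, bEmit, sjoin_nil]
    | false =>
      simp only [gEmit]
      rw [ih (join ++ v)]
      simp only [bTakeRun, Bool.false_eq_true, if_false, sjoin_cons]
      rw [String.append_assoc]

theorem loopA_eq (key substitution : String) : ∀ (parts : List String) (solved : List String) (join : String),
    finishA (solveALoop key substitution parts solved join)
    = solved ++ gEmit join (parts.map (bClassify key substitution)) := by
  intro parts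
  induction parts with
  | nil =>
    intro solved join
    rw [solveALoop, finishA]
    simp only [List.map_nil, gEmit]
    split <;> simp
  | cons p ps ih =>
    intro solved join
    rw [solveALoop, List.map_cons]
    by_cases h1 : PySem.Str.startswith p "{" = true
    · rw [if_pos h1]
      by_cases h2 : (key == PySem.Str.slice p (some 1) (some (-1))) = true
      · have h2' : (PySem.Str.slice p (some 1) (some (-1)) == key) = true := by
          rw [beq_iff_eq] at h2 ⊢; exact h2.symm
        have hc : bClassify key substitution p = (false, substitution) := by
          rw [bClassify, if_pos h1, if_pos h2']
        rw [if_pos h2, ih, hc]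
        simp only [gEmit]
      · have h2' : ¬ (PySem.Str.slice p (some 1) (some (-1)) == key) = true := by
          rw [beq_iff_eq]
          intro h
          exact h2 (by rw [beq_iff_eq]; exact h.symm)
        have hc : bClassify key substitution p = (true, p) := by
          rw [bClassify, if_pos h1, if_neg h2']
        rw [if_neg h2, ih, hc]
        simp only [gEmit]
        split <;> simp
    · have hc : bClassify key substitution p = (false, p) := by
        rw [bClassify, if_neg h1]
      rw [if_neg h1, ih, hc]
      simp only [gEmit]

-- ===== VERDICT (by name: the statement is the Claim_ definition above) =====
theorem solve_parts_spec : Claim_equal_solve_parts := by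
  intro parts key substitution _
  unfold Spec_solve_parts solve_parts solve_parts_alt
  have h := loopA_eq key substitution parts [] ""
  rw [finishA] at h
  simp only [List.nil_append] at h
  rw [h, gEmit_eq]
  simp only [String.empty_append]
  rw [← bEmit_eq_run]
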